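-- pv_equiv track=rewrite | github.com/albyr05/esami | gara_trial/main.py | find_best_streak
-- ===== SOURCE A (Python) =====
-- def find_best_streak(penalty):
--     best = 0
--     top = None
--     for k in penalty:       #& per ogni partecipante
--         i = 0
--         while i < len(penalty[k]):      #& ciclo su ogni penalità
--             if penalty[k][i] == 0:      #& se è uguale a zero inizio una sequenza
--                 j = 0
--                 while i < len(penalty[k]):
--                     if penalty[k][i] == 0:          #& se l'elemento successivo è ancora uguale a 0 incremento di uno la sequenza e passo all'elemento dopo
--                         j += 1
--                         i += 1
--                     else:           #& se no interrompo il ciclo interno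
--                         break
--                 if j >= best:       #& se la sequenza appena terminata è maggiore a quella che prima era la più lunga sovrescrivo il suo valore e anche quello dle partecipante
--                     best = j
--                     top = k
--             i += 1
--
--     return top, best
-- ===== SOURCE B (Python) =====
-- def find_best_streak(penalty):
--     top = None
--     best = 0
--     for k in penalty:
--         vals = penalty[k]
--         # boundary positions: one before the start, every non-zero index, one past the end;
--         # the gaps between consecutive boundaries are exactly the zero-run lengths
--         stops = [-1] + [i for i, v in enumerate(vals) if v != 0] + [len(vals)]
--         streak = max(b - a - 1 for a, b in zip(stops, stops[1:]))
--         if streak >= 1 and streak >= best: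
--             best = streak
--             top = k
--     return top, best
-- ===== Notes on version B (the rewrite author's own statement) =====
-- stated objective: alternative
-- what changed: A's nested index-advancing while loops (inner loop counting a run, per-run best update) are replaced by an explicit boundary/gap decomposition: each participant's zero-run lengths are the gaps between consecutive non-zero positions (with -1 and len sentinels), and a single guarded max comparison per participant replicates the >= last-wins tie-break.
import Mathlib
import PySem

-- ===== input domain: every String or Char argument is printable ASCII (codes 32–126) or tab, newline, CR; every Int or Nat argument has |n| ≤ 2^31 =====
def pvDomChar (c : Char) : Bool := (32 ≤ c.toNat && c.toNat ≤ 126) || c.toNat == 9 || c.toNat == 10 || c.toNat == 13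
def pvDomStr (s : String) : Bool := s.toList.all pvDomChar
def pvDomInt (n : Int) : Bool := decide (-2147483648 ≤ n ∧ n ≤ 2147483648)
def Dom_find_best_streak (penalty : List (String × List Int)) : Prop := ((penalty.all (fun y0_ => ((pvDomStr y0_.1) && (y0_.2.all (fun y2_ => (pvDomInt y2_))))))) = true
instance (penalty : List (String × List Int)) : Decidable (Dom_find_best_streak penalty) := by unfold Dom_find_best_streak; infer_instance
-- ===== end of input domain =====

-- B replaces A's nested index-advancing while loops by an explicit boundary/gap decomposition:
-- the zero-run lengths are the gaps between consecutive non-zero positions (with sentinels),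
-- and the per-participant update becomes a single guarded max comparison (objective: alternative).

-- ===== PORT A =====
-- penalty[k]: dict lookup = first match in the association list (Python dict keys are unique)
def pvLookup (penalty : List (String × List Int)) (k : String) : List Int :=
  (penalty.lookup k).getD []

-- inner 'while' of A: consume zeros from index i, counting into j
def pvARun (vals : List Int) (i : Nat) (j : Int) : Nat × Int :=
  if h : i < vals.length then
    if vals[i] = 0 then pvARun vals (i + 1) (j + 1) else (i, j)
  else (i, j)
termination_by vals.length - i

-- needed by pvAScan's termination proof
theorem pvARun_fst_ge (vals : List Int) (i : Nat) (j : Int) : i ≤ (pvARun vals i j).1 := by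
  unfold pvARun
  split
  · split
    · exact le_trans (Nat.le_succ i) (pvARun_fst_ge vals (i + 1) (j + 1))
    · exact le_refl i
  · exact le_refl i
termination_by vals.length - i

-- outer 'while' of A over one participant's list
def pvAScan (vals : List Int) (i : Nat) (best : Int) (top : Option String) (k : String) :
    Int × Option String :=
  if h : i < vals.length then
    if vals[i] = 0 then
      let p := pvARun vals i 0
      let best' := if p.2 ≥ best then p.2 else best
      let top' := if p.2 ≥ best then some k else top
      pvAScan vals (p.1 + 1) best' top' k
    else
      pvAScan vals (i + 1) best top k
  else (best, top)
termination_by vals.length - i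
decreasing_by
  · have := pvARun_fst_ge vals i 0; omega
  · omega

def find_best_streak (penalty : List (String × List Int)) : Option String × Int :=
  let r := penalty.foldl
    (fun (st : Int × Option String) kv => pvAScan (pvLookup penalty kv.1) 0 st.1 st.2 kv.1)
    (0, none)
  (r.2, r.1)

-- ===== PORT B =====
-- stops = [-1] + [i for i, v in enumerate(vals) if v != 0] + [len(vals)]
def pvStops (vals : List Int) : List Int :=
  [-1] ++ (PySem.List.enumerate vals 0).filterMap (fun p => if p.2 ≠ 0 then some p.1 else none)
       ++ [(vals.length : Int)]

-- streak = max(b - a - 1 for a, b in zip(stops, stops[1:]))  (stops has ≥ 2 elements, so max never sees empty)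
def pvStreak (vals : List Int) : Int :=
  let stops := pvStops vals
  ((PySem.List.max? ((stops.zip (PySem.List.slice stops (some 1) none)).map
      (fun q => q.2 - q.1 - 1)) (fun y => y)).getD 0)

def find_best_streak_alt (penalty : List (String × List Int)) : Option String × Int :=
  let r := penalty.foldl
    (fun (st : Int × Option String) kv =>
      let streak := pvStreak (pvLookup penalty kv.1)
      if streak ≥ 1 ∧ streak ≥ st.1 then (streak, some kv.1) else st)
    (0, none)
  (r.2, r.1)

-- ===== PRECONDITION & SPEC =====
def Spec_find_best_streak (penalty : List (String × List Int)) (out : Option String × Int) : Prop := out = find_best_streak_alt penalty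
instance (penalty : List (String × List Int)) (out : Option String × Int) : Decidable (Spec_find_best_streak penalty out) := by unfold Spec_find_best_streak; infer_instance

-- ===== CLAIM (what is proved, stated in full; the proofs are below) =====
def Claim_equal_find_best_streak : Prop := ∀ (penalty : List (String × List Int)), Dom_find_best_streak penalty → Spec_find_best_streak penalty (find_best_streak penalty)

-- ===== LEMMAS AND PROOFS =====

-- canonical "max zero-run" with c zeros already consumed
def pvW : List Int → Nat → Int
  | [], c => (c : Int)
  | x :: xs, c => if x = 0 then pvW xs (c + 1) else max (c : Int) (pvW xs 0)

theorem pvW_nonneg (L : List Int) (c : Nat) : 0 ≤ pvW L c := by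
  induction L generalizing c with
  | nil => simp [pvW]
  | cons x xs ih =>
    simp only [pvW]
    split
    · exact ih (c + 1)
    · exact le_max_of_le_left (by positivity)

-- number of leading zeros
def pvLZ (L : List Int) : Nat := (L.takeWhile (fun x => x == 0)).length

theorem pvLZ_cons_zero (xs : List Int) : pvLZ (0 :: xs) = pvLZ xs + 1 := by
  simp [pvLZ]

theorem pvLZ_cons_ne (x : Int) (xs : List Int) (h : x ≠ 0) : pvLZ (x :: xs) = 0 := by
  simp [pvLZ, h]

-- collapse one whole zero-run of pvW
theorem pvW_collapse (L : List Int) (c : Nat) :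
    pvW L c = max ((c : Int) + pvLZ L) (pvW ((L.drop (pvLZ L)).drop 1) 0) := by
  induction L generalizing c with
  | nil => simp [pvW, pvLZ]
  | cons x xs ih =>
    by_cases hx : x = 0
    · subst hx
      simp only [pvW, pvLZ_cons_zero]
      rw [ih (c + 1), List.drop_succ_cons]
      have h1 : ((c + 1 : Nat) : Int) + (pvLZ xs : Int)
          = (c : Int) + ((pvLZ xs + 1 : Nat) : Int) := by push_cast; ring
      rw [h1]
      simp
    · simp only [pvW, if_neg hx, pvLZ_cons_ne x xs hx]
      simp

theorem pvARun_eq (vals : List Int) (i : Nat) (j : Int) :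
    pvARun vals i j = (i + pvLZ (vals.drop i), j + pvLZ (vals.drop i)) := by
  rw [pvARun]
  split
  next h =>
    rw [List.drop_eq_getElem_cons h]
    split
    next hz =>
      rw [pvARun_eq vals (i + 1) (j + 1), hz, pvLZ_cons_zero]
      simp only [Prod.mk.injEq]
      refine ⟨by omega, by push_cast; ring⟩
    next hz =>
      rw [pvLZ_cons_ne _ _ hz]
      simp
  next h =>
    rw [List.drop_eq_nil_of_le (by omega)]
    simp [pvLZ]
termination_by vals.length - i

-- the shared per-participant step
def pvF (w best : Int) (top : Option String) (k : String) : Int × Option String :=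
  if w ≥ 1 ∧ w ≥ best then (w, some k) else (best, top)

theorem pvF_step (c r best : Int) (top : Option String) (k : String)
    (hc : 1 ≤ c) (_hb : 0 ≤ best) (hr : 0 ≤ r) :
    pvF (max c r) best top k
      = pvF r (if c ≥ best then c else best) (if c ≥ best then some k else top) k := by
  unfold pvF
  rcases le_total c r with hcr | hcr
  · rw [max_eq_right hcr]
    split_ifs <;> simp_all <;> omega
  · rw [max_eq_left hcr]
    split_ifs <;> simp_all <;> omega

theorem pvAScan_eq (vals : List Int) (i : Nat) (best : Int) (top : Option String) (k : String)
    (hb : 0 ≤ best) :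
    pvAScan vals i best top k = pvF (pvW (vals.drop i) 0) best top k := by
  rw [pvAScan]
  split
  next h =>
    split
    next hz =>
      simp only [pvARun_eq]
      have hdrop : vals.drop i = 0 :: vals.drop (i + 1) := by
        rw [List.drop_eq_getElem_cons h, hz]
      have hc1 : 1 ≤ pvLZ (vals.drop i) := by rw [hdrop, pvLZ_cons_zero]; omega
      have hrec : ((vals.drop i).drop (pvLZ (vals.drop i))).drop 1
          = vals.drop (i + pvLZ (vals.drop i) + 1) := by
        rw [List.drop_drop, List.drop_drop]; ring_nf
      set c : Nat := pvLZ (vals.drop i) with hcdef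
      have hb' : (0:Int) ≤ (if (0:Int) + (c:Int) ≥ best then (0:Int) + (c:Int) else best) := by
        split <;> omega
      rw [pvAScan_eq vals (i + c + 1) _ _ k hb']
      rw [pvW_collapse (vals.drop i) 0, hrec]
      have key := pvF_step (c:Int) (pvW (vals.drop (i + c + 1)) 0) best top k
        (by exact_mod_cast hc1) hb (pvW_nonneg _ _)
      simp only [Nat.cast_zero, zero_add] at key ⊢
      exact key.symm
    next hz =>
      rw [pvAScan_eq vals (i + 1) best top k hb]
      have hdrop : vals.drop i = vals[i] :: vals.drop (i + 1) := List.drop_eq_getElem_cons h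
      rw [hdrop]
      simp only [pvW, if_neg hz]
      rw [max_eq_right (by simpa using pvW_nonneg (vals.drop (i + 1)) 0)]
  next h =>
    rw [List.drop_eq_nil_of_le (by omega)]
    simp [pvW, pvF]
termination_by vals.length - i
decreasing_by
  · omega
  · omega

-- ---- B side ----

-- non-zero indices starting at s (proof-side structural form of the filterMap over enumerate)
def pvNZ : List Int → Int → List Int
  | [], _ => []
  | x :: xs, s => if x ≠ 0 then s :: pvNZ xs (s + 1) else pvNZ xs (s + 1)

theorem pvNZ_eq (L : List Int) (s : Int) :
    (PySem.List.enumerate L s).filterMap (fun p => if p.2 ≠ 0 then some p.1 else none)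
      = pvNZ L s := by
  induction L generalizing s with
  | nil => simp [PySem.List.enumerate_nil, pvNZ]
  | cons x xs ih =>
    rw [PySem.List.enumerate_cons]
    simp only [List.filterMap_cons, pvNZ]
    split <;> simp_all

-- successive differences minus one along p :: is ++ [last]
def pvPD : Int → List Int → Int → List Int
  | p, [], last => [last - p - 1]
  | p, a :: as, last => (a - p - 1) :: pvPD a as last

theorem pvPD_ne_nil (p : Int) (is : List Int) (last : Int) : pvPD p is last ≠ [] := by
  cases is <;> simp [pvPD]

theorem pvZipDiff (rest : List Int) (p last : Int) :
    (((p :: rest ++ [last]).zip ((p :: rest ++ [last]).drop 1)).map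
        (fun q => q.2 - q.1 - 1)) = pvPD p rest last := by
  induction rest generalizing p with
  | nil => simp [pvPD]
  | cons a as ih =>
    simp only [List.cons_append, List.drop_succ_cons, List.drop_zero, List.zip_cons_cons,
      List.map_cons, pvPD]
    have := ih a
    simp only [List.cons_append, List.drop_succ_cons, List.drop_zero] at this
    rw [this]

-- maximum of pvPD, recursively
def pvMPD : Int → List Int → Int → Int
  | p, [], last => last - p - 1
  | p, a :: as, last => max (a - p - 1) (pvMPD a as last)

theorem foldl_max_pull (l : List Int) (x y : Int) :
    l.foldl max (max x y) = max x (l.foldl max y) := by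
  induction l generalizing y with
  | nil => simp
  | cons a as ih => simp only [List.foldl_cons, max_assoc, ih]

theorem pvMaxPD (is : List Int) (p last : Int) :
    ((PySem.List.max? (pvPD p is last) (fun y => y)).getD 0) = pvMPD p is last := by
  induction is generalizing p with
  | nil => simp [pvPD, pvMPD, PySem.List.max?_id_cons]
  | cons a as ih =>
    simp only [pvPD, pvMPD]
    obtain ⟨h, t, ht⟩ : ∃ h t, pvPD a as last = h :: t := by
      cases hh : pvPD a as last with
      | nil => exact absurd hh (pvPD_ne_nil a as last)
      | cons h t => exact ⟨h, t, rfl⟩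
    have ihv := ih a
    rw [ht, PySem.List.max?_id_cons] at ihv
    simp only [Option.getD_some] at ihv
    rw [ht, PySem.List.max?_id_cons]
    simp only [Option.getD_some, List.foldl_cons]
    rw [foldl_max_pull, ihv]

theorem pvMPD_eq_W (L : List Int) (c : Nat) (s : Int) :
    pvMPD (s - 1 - c) (pvNZ L s) (s + L.length) = pvW L c := by
  induction L generalizing c s with
  | nil =>
    simp only [pvNZ, pvMPD, pvW, List.length_nil]
    push_cast
    ring
  | cons x xs ih =>
    by_cases hx : x = 0
    · subst hx
      rw [show pvNZ (0 :: xs) (s) = pvNZ xs (s + 1) from by simp [pvNZ]]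
      rw [show pvW (0 :: xs) c = pvW xs (c + 1) from by simp [pvW]]
      simp only [List.length_cons]
      calc pvMPD (s - 1 - (c : Int)) (pvNZ xs (s + 1)) (s + ((xs.length + 1 : Nat) : Int))
          = pvMPD ((s + 1) - 1 - ((c + 1 : Nat) : Int)) (pvNZ xs (s + 1))
              ((s + 1) + (xs.length : Int)) := by
            congr 1 <;> push_cast <;> ring
        _ = pvW xs (c + 1) := ih (c + 1) (s + 1)
    · simp only [pvNZ, if_pos hx, pvW, if_neg hx, List.length_cons, pvMPD]
      have h2 : pvMPD s (pvNZ xs (s + 1)) (s + ((xs.length + 1 : Nat) : Int))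
          = pvW xs 0 := by
        calc pvMPD s (pvNZ xs (s + 1)) (s + ((xs.length + 1 : Nat) : Int))
            = pvMPD ((s + 1) - 1 - ((0 : Nat) : Int)) (pvNZ xs (s + 1))
                ((s + 1) + (xs.length : Int)) := by
              congr 1 <;> push_cast <;> ring
          _ = pvW xs 0 := ih 0 (s + 1)
      rw [h2]
      congr 1
      ring

theorem pvStreak_eq (vals : List Int) : pvStreak vals = pvW vals 0 := by
  simp only [pvStreak, pvStops]
  rw [PySem.List.slice_from_one]
  rw [pvNZ_eq]
  have hzd := pvZipDiff (pvNZ vals 0) (-1) (vals.length : Int)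
  simp only [List.cons_append, List.nil_append, List.drop_one, List.tail_cons] at hzd ⊢
  rw [hzd, pvMaxPD]
  have := pvMPD_eq_W vals 0 0
  simpa using this

-- both folds agree from any state with non-negative best
theorem pvFold_eq (penalty ks : List (String × List Int)) (best : Int) (top : Option String)
    (hb : 0 ≤ best) :
    ks.foldl (fun (st : Int × Option String) kv =>
        pvAScan (pvLookup penalty kv.1) 0 st.1 st.2 kv.1) (best, top)
      = ks.foldl (fun (st : Int × Option String) kv =>
          let streak := pvStreak (pvLookup penalty kv.1)
          if streak ≥ 1 ∧ streak ≥ st.1 then (streak, some kv.1) else st) (best, top) := by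
  induction ks generalizing best top with
  | nil => rfl
  | cons kv ks ih =>
    simp only [List.foldl_cons]
    have hstep : pvAScan (pvLookup penalty kv.1) 0 best top kv.1
        = (let streak := pvStreak (pvLookup penalty kv.1)
           if streak ≥ 1 ∧ streak ≥ best then (streak, some kv.1) else (best, top)) := by
      rw [pvAScan_eq _ _ _ _ _ hb, pvStreak_eq]
      simp [pvF]
    rw [hstep]
    by_cases hcond : pvStreak (pvLookup penalty kv.1) ≥ 1 ∧ pvStreak (pvLookup penalty kv.1) ≥ best
    · simp only [if_pos hcond]
      exact ih _ _ (by omega)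
    · simp only [if_neg hcond]
      exact ih _ _ hb

-- ===== VERDICT (by name: the statement is the Claim_ definition above) =====
theorem find_best_streak_spec : Claim_equal_find_best_streak := by
  intro penalty _
  unfold Spec_find_best_streak find_best_streak find_best_streak_alt
  rw [pvFold_eq penalty penalty 0 none le_rfl]
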